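-- pv_equiv track=rewrite | github.com/daeun503/TIL | BOJ/BOJ23291/BOJ23291.py | stack_fishbowls
-- ===== SOURCE A (Python) =====
-- def stack_fishbowls(height, stack_width, total_width, fishbowls):
--     # 공중 부양 시키는 것이 불가능하면 return
--     if height > total_width - stack_width:
--         return fishbowls
--
--     # 다음 단계 공중 부양은 높이 stack_width + 1 x 너비 total_width - stack_width
--     h, w = stack_width + 1, total_width - stack_width
--     next_fishbowls = [[-1]*w for _ in range(h)]
--     for stack_h in range(height):
--         for stack_w in range(stack_width):
--             next_fishbowls[stack_w][stack_h] = fishbowls[(height-1) - stack_h][stack_w]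
--     for non_stack_w in range(w):
--         next_fishbowls[-1][non_stack_w] = fishbowls[-1][stack_width + non_stack_w]
--
--     # 다음 단계로
--     fishbowls = stack_fishbowls(stack_width + 1, height, total_width - stack_width, next_fishbowls)
--     return fishbowls
-- ===== SOURCE B (Python) =====
-- def stack_fishbowls(height, stack_width, total_width, fishbowls):
--     # Iterative rewrite: explicit while loop, each next grid built immutably by
--     # comprehension (transposed-reversed block, -1 padding, sliced last row).
--     while height <= total_width - stack_width:
--         w = total_width - stack_width
--         rows = [
--             [fishbowls[height - 1 - j][i] for j in range(height)] + [-1] * (w - height)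
--             for i in range(stack_width)
--         ]
--         next_fishbowls = rows + [fishbowls[-1][stack_width:]]
--         height, stack_width, total_width, fishbowls = stack_width + 1, height, w, next_fishbowls
--     return fishbowls
-- ===== Notes on version B (the rewrite author's own statement) =====
-- stated objective: simpler
-- what changed: The tail recursion is rewritten as an explicit while loop with simultaneous state update, and each next grid is built immutably by list comprehension (transposed block + padding + sliced last row) instead of allocating a -1 matrix and mutating it cell by cell.
-- outside the precondition, e.g. on stack_fishbowls(1, 0, 1, [[5, 7]]): A returns [[5]], B returns [[5, 7]]
import Mathlib
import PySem

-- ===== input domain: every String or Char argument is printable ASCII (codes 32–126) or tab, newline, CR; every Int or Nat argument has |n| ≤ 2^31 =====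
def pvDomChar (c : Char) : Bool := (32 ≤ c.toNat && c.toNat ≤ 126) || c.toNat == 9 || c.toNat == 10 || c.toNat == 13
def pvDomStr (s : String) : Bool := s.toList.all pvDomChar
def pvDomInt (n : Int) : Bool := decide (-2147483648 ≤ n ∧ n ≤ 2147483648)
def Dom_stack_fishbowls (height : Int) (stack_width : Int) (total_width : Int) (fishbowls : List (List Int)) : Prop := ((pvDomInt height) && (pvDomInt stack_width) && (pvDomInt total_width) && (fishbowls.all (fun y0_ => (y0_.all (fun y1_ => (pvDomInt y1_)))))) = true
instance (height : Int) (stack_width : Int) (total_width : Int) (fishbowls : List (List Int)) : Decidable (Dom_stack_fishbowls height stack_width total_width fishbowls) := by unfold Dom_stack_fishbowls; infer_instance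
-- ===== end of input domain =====

-- B replaces A's tail recursion by an explicit while-style loop whose next grid is
-- built immutably by comprehension instead of mutating a preallocated -1 matrix (objective: simpler).


-- ===== PORT A =====
-- next_fishbowls[i][j] = v  (Python 2-level item assignment; exact via pySetD/pyGetD, total form — Pre_ keeps indices in range)
def pvSet2 (g : List (List Int)) (i j v : Int) : List (List Int) :=
  PySem.List.pySetD g i (PySem.List.pySetD (PySem.List.pyGetD g i []) j v)

-- one body of A's recursion: build next_fishbowls exactly as A does (replicate then two mutation loops)
def pvStepA (height stack_width total_width : Int) (fishbowls : List (List Int)) : List (List Int) :=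
  let h := stack_width + 1
  let w := total_width - stack_width
  let next0 := (PySem.List.pyRange 0 h 1).map (fun _ => List.replicate w.toNat (-1 : Int))
  let next1 := (PySem.List.pyRange 0 height 1).foldl (fun g stack_h =>
      (PySem.List.pyRange 0 stack_width 1).foldl (fun g stack_w =>
        pvSet2 g stack_w stack_h
          (PySem.List.pyGetD (PySem.List.pyGetD fishbowls ((height - 1) - stack_h) []) stack_w 0)) g) next0
  (PySem.List.pyRange 0 w 1).foldl (fun g non_stack_w =>
      pvSet2 g (-1) non_stack_w
        (PySem.List.pyGetD (PySem.List.pyGetD fishbowls (-1) []) (stack_width + non_stack_w) 0)) next1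

-- A's recursion, made total with a fuel guard (the fuel bound never runs out on Pre_ inputs)
def pvLoopA : Nat → Int → Int → Int → List (List Int) → List (List Int)
  | 0, _, _, _, fb => fb
  | fuel+1, h, s, t, fb =>
    if h > t - s then fb
    else pvLoopA fuel (s + 1) h (t - s) (pvStepA h s t fb)

def stack_fishbowls (height : Int) (stack_width : Int) (total_width : Int) (fishbowls : List (List Int)) : List (List Int) :=
  pvLoopA ((height.natAbs + stack_width.natAbs + total_width.natAbs) * 2 + 4) height stack_width total_width fishbowls

-- ===== PORT B =====
-- one body of B's while loop: the next grid built immutably (comprehension rows + sliced last row)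
def pvStepB (height stack_width total_width : Int) (fishbowls : List (List Int)) : List (List Int) :=
  let w := total_width - stack_width
  let rows := (PySem.List.pyRange 0 stack_width 1).map (fun i =>
      ((PySem.List.pyRange 0 height 1).map (fun j =>
        PySem.List.pyGetD (PySem.List.pyGetD fishbowls (height - 1 - j) []) i 0))
      ++ List.replicate (w - height).toNat (-1 : Int))
  rows ++ [PySem.List.slice (PySem.List.pyGetD fishbowls (-1) []) (some stack_width) none]

-- B's while loop, made total with the same fuel guard
def pvLoopB : Nat → Int → Int → Int → List (List Int) → List (List Int)
  | 0, _, _, _, fb => fb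
  | fuel+1, h, s, t, fb =>
    if h ≤ t - s then pvLoopB fuel (s + 1) h (t - s) (pvStepB h s t fb)
    else fb

def stack_fishbowls_alt (height : Int) (stack_width : Int) (total_width : Int) (fishbowls : List (List Int)) : List (List Int) :=
  pvLoopB ((height.natAbs + stack_width.natAbs + total_width.natAbs) * 2 + 4) height stack_width total_width fishbowls

-- ===== PRECONDITION & SPEC =====
-- Pre_ admits every input on which the floating step is skipped at once, plus the function's natural
-- domain (height >= 1 rows of width total_width, stack_width >= 0); it excludes malformed grids /
-- negative parameters on which A either raises IndexError or returns a value produced by accidental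
-- negative-index wraparound and partial reads of overlong rows.
def Pre_stack_fishbowls (height : Int) (stack_width : Int) (total_width : Int) (fishbowls : List (List Int)) : Prop :=
  (total_width - stack_width < height) ∨
  (1 ≤ height ∧ 0 ≤ stack_width ∧ (fishbowls.length : Int) = height ∧
    ∀ row ∈ fishbowls, (row.length : Int) = total_width)
instance (height : Int) (stack_width : Int) (total_width : Int) (fishbowls : List (List Int)) : Decidable (Pre_stack_fishbowls height stack_width total_width fishbowls) := by unfold Pre_stack_fishbowls; infer_instance

def pvWitness_stack_fishbowls : Int × Int × Int × List (List Int) := (2, 1, 3, [[1, 2, 3], [4, 5, 6]])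

def Spec_stack_fishbowls (height : Int) (stack_width : Int) (total_width : Int) (fishbowls : List (List Int)) (out : List (List Int)) : Prop := out = stack_fishbowls_alt height stack_width total_width fishbowls
instance (height : Int) (stack_width : Int) (total_width : Int) (fishbowls : List (List Int)) (out : List (List Int)) : Decidable (Spec_stack_fishbowls height stack_width total_width fishbowls out) := by unfold Spec_stack_fishbowls; infer_instance

-- ===== CLAIM (what is proved, stated in full; the proofs are below) =====
def Claim_equal_stack_fishbowls : Prop := ∀ (height : Int) (stack_width : Int) (total_width : Int) (fishbowls : List (List Int)), Dom_stack_fishbowls height stack_width total_width fishbowls → Pre_stack_fishbowls height stack_width total_width fishbowls → Spec_stack_fishbowls height stack_width total_width fishbowls (stack_fishbowls height stack_width total_width fishbowls)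

-- ===== LEMMAS AND PROOFS =====

-- the shape invariant that A's recursion maintains
def pvInv (h s t : Int) (fb : List (List Int)) : Prop :=
  1 ≤ h ∧ 0 ≤ s ∧ (fb.length : Int) = h ∧ ∀ row ∈ fb, (row.length : Int) = t

theorem pvMapIdxReplicate (n : Nat) (a : List Int) (f : Nat → List Int → List Int) :
    (List.replicate n a).mapIdx f = (List.range n).map (fun r => f r a) := by
  apply List.ext_getElem (by simp)
  intro i h1 h2
  simp [List.getElem_mapIdx]

theorem pvRowFill (n m : Nat) (d : Int) (f : Int → Int) (hmn : m ≤ n) :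
    (PySem.List.pyRange 0 (m : Int) 1).foldl (fun row j => PySem.List.pySetD row j (f j))
      (List.replicate n d)
    = (PySem.List.pyRange 0 (m : Int) 1).map f ++ List.replicate (n - m) d := by
  induction m with
  | zero => simp [PySem.List.pyRange_one_eq_nil]
  | succ m ih =>
    have h1 : ((m + 1 : Nat) : Int) = (m : Int) + 1 := by push_cast; ring
    rw [h1, PySem.List.pyRange_one_succ_right (by positivity), List.foldl_append, List.map_append,
      ih (by omega)]
    have hlen : ((PySem.List.pyRange 0 (m : Int) 1).map f).length = m := by
      simp [PySem.List.length_pyRange_one]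
    have hrep : List.replicate (n - m) d = d :: List.replicate (n - (m+1)) d := by
      rw [← List.replicate_succ]; congr 1; omega
    simp only [List.foldl_cons, List.foldl_nil, List.map_cons, List.map_nil,
      PySem.List.pySetD_natCast, hrep]
    rw [List.set_append_right _ _ (by omega)]
    simp [hlen]

theorem pvMapIdxId (g : List (List Int)) : g.mapIdx (fun _ row => row) = g := by
  apply List.ext_getElem (by simp)
  intro i h1 h2; simp [List.getElem_mapIdx]

theorem pvColPass (g : List (List Int)) (s' : Nat) (c : Int) (V : Int → Int)
    (hs : s' ≤ g.length) :
    (PySem.List.pyRange 0 (s' : Int) 1).foldl (fun g i => pvSet2 g i c (V i)) g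
    = g.mapIdx (fun r row => if r < s' then PySem.List.pySetD row c (V r) else row) := by
  induction s' with
  | zero => simp [PySem.List.pyRange_one_eq_nil, pvMapIdxId]
  | succ m ih =>
    have h1 : ((m + 1 : Nat) : Int) = (m : Int) + 1 := by push_cast; ring
    rw [h1, PySem.List.pyRange_one_succ_right (by positivity), List.foldl_append,
      ih (by omega)]
    simp only [List.foldl_cons, List.foldl_nil]
    apply List.ext_getElem (by simp [pvSet2])
    intro i hi1 hi2
    have hm : m < g.length := by omega
    simp only [pvSet2, PySem.List.pySetD_natCast, PySem.List.pyGetD_natCast]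
    have hlen : (g.mapIdx (fun r row => if r < m then PySem.List.pySetD row c (V r) else row)).length = g.length := by simp
    have hgetD : (g.mapIdx (fun r row => if r < m then PySem.List.pySetD row c (V r) else row)).getD m [] = g[m] := by
      rw [List.getD_eq_getElem _ _ (by omega), List.getElem_mapIdx]
      simp
    simp only [hgetD]
    rw [List.getElem_set]
    simp only [List.getElem_mapIdx]
    by_cases h : i = m
    · subst h
      rw [if_pos rfl, if_pos (by omega)]
    · rw [if_neg (show ¬ (m = i) by omega)]
      by_cases h2 : i < m
      · rw [if_pos h2, if_pos (by omega)]
      · rw [if_neg h2, if_neg (by omega)]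

theorem pvOuterFold (cs : List Int) (s' : Nat) (V : Int → Int → Int) :
    ∀ (g : List (List Int)), s' ≤ g.length →
    cs.foldl (fun g c => (PySem.List.pyRange 0 (s' : Int) 1).foldl (fun g i => pvSet2 g i c (V c i)) g) g
    = g.mapIdx (fun r row => if r < s' then cs.foldl (fun row c => PySem.List.pySetD row c (V c r)) row else row) := by
  induction cs with
  | nil =>
    intro g _
    apply List.ext_getElem (by simp)
    intro i h1 h2; simp [List.getElem_mapIdx]
  | cons c cs ih =>
    intro g hs
    simp only [List.foldl_cons]
    rw [pvColPass g s' c (fun i => V c i) hs, ih _ (by simp [hs]), List.mapIdx_mapIdx]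
    apply List.ext_getElem (by simp)
    intro i h1 h2
    simp only [List.getElem_mapIdx, Function.comp_apply]
    by_cases h : i < s'
    · rw [if_pos h, if_pos h, if_pos h]
    · rw [if_neg h, if_neg h, if_neg h]

theorem pvSetLast (front : List (List Int)) (x v : List Int) :
    PySem.List.pySetD (front ++ [x]) (-1) v = front ++ [v] := by
  simp [PySem.List.pySetD, PySem.List.pySet?, PySem.List.pyIdx?]

theorem pvLastPass (u : List Int → Int → List Int) (js : List Int) :
    ∀ (front : List (List Int)) (lr : List Int),
    js.foldl (fun g j => PySem.List.pySetD g (-1) (u (PySem.List.pyGetD g (-1) []) j)) (front ++ [lr])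
    = front ++ [js.foldl u lr] := by
  induction js with
  | nil => intro front lr; rfl
  | cons j js ih =>
    intro front lr
    simp only [List.foldl_cons, PySem.List.pyGetD_neg_one_append_singleton, pvSetLast]
    exact ih front (u lr j)

theorem pvStep_eq (h s t : Int) (fb : List (List Int))
    (hinv : pvInv h s t fb) (hg : h ≤ t - s) :
    pvStepA h s t fb = pvStepB h s t fb := by
  obtain ⟨hh1, hs0, hlen, hrows⟩ := hinv
  obtain ⟨h', rfl⟩ : ∃ n : Nat, (n : Int) = h := ⟨h.toNat, Int.toNat_of_nonneg (by omega)⟩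
  obtain ⟨s', rfl⟩ : ∃ n : Nat, (n : Int) = s := ⟨s.toNat, Int.toNat_of_nonneg hs0⟩
  obtain ⟨t', rfl⟩ : ∃ n : Nat, (n : Int) = t := ⟨t.toNat, Int.toNat_of_nonneg (by omega)⟩
  have hst : s' ≤ t' := by omega
  have hht : h' ≤ t' - s' := by omega
  have hfbne : fb ≠ [] := by intro hnil; subst hnil; simp at hlen; omega
  have hlast : (PySem.List.pyGetD fb (-1) []).length = t' := by
    rw [PySem.List.pyGetD_neg_one fb [] hfbne]
    have := hrows _ (List.getLast_mem hfbne)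
    omega
  simp only [pvStepA, pvStepB]
  -- the -1-filled matrix is a replicate
  have hnext0 : (PySem.List.pyRange 0 ((s' : Int) + 1) 1).map
        (fun _ => List.replicate ((t' : Int) - (s' : Int)).toNat (-1 : Int))
      = List.replicate (s' + 1) (List.replicate (t' - s') (-1 : Int)) := by
    rw [List.map_const']
    congr 1
    · rw [PySem.List.length_pyRange_one]; omega
    · congr 1; omega
  rw [hnext0]
  -- the double mutation loop, rowwise
  rw [pvOuterFold (PySem.List.pyRange 0 (h' : Int) 1) s'
        (fun c i => PySem.List.pyGetD (PySem.List.pyGetD fb (((h' : Int) - 1) - c) []) i 0)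
        _ (by simp),
      pvMapIdxReplicate]
  -- split off the untouched last row
  rw [List.range_succ, List.map_append, List.map_singleton, if_neg (lt_irrefl s')]
  -- the final loop rewrites exactly the last row
  simp only [pvSet2]
  rw [pvLastPass (fun row j => PySem.List.pySetD row j
        (PySem.List.pyGetD (PySem.List.pyGetD fb (-1) []) ((s' : Int) + j) 0))
      (PySem.List.pyRange 0 ((t' : Int) - (s' : Int)) 1)]
  congr 1
  -- front rows
  · rw [PySem.List.pyRange_one 0 (s' : Int)]
    simp only [List.map_map, Int.sub_zero, Int.toNat_natCast]
    apply List.map_congr_left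
    intro r hr
    rw [if_pos (List.mem_range.mp hr),
        pvRowFill (t' - s') h' (-1) _ hht]
    simp only [Function.comp_apply, zero_add]
    congr 2
    omega
  -- last row
  · have hcast : ((t' : Int) - (s' : Int)) = ((t' - s' : Nat) : Int) := by omega
    rw [hcast, pvRowFill (t' - s') (t' - s') (-1) _ le_rfl]
    simp only [Nat.sub_self, List.replicate_zero, List.append_nil]
    rw [PySem.List.slice_from_natCast]
    have hdrop := PySem.List.map_pyGetD_pyRange' (PySem.List.pyGetD fb (-1) []) 0
      (a := (s' : Int)) (by positivity)
    rw [hlast] at hdrop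
    simp only [Int.toNat_natCast] at hdrop
    rw [← hdrop, PySem.List.pyRange_one, PySem.List.pyRange_one ((s' : Int)) ((t' : Int)),
      List.map_map, List.map_map]
    congr 1
    have he1 : (((t' - s' : Nat) : Int) - 0).toNat = t' - s' := by omega
    have he2 : ((t' : Int) - (s' : Int)).toNat = t' - s' := by omega
    rw [he1, he2]
    apply List.map_congr_left
    intro k hk
    simp

theorem pvStep_inv (h s t : Int) (fb : List (List Int))
    (hinv : pvInv h s t fb) (hg : h ≤ t - s) :
    pvInv (s + 1) h (t - s) (pvStepB h s t fb) := by
  obtain ⟨hh1, hs0, hlen, hrows⟩ := hinv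
  have hfbne : fb ≠ [] := by intro hnil; subst hnil; simp at hlen; omega
  have hlast : ((PySem.List.pyGetD fb (-1) []).length : Int) = t := by
    rw [PySem.List.pyGetD_neg_one fb [] hfbne]
    exact hrows _ (List.getLast_mem hfbne)
  refine ⟨by omega, by omega, ?_, ?_⟩
  · simp [pvStepB, PySem.List.length_pyRange_one]
    omega
  · intro row hrow
    simp only [pvStepB, List.mem_append, List.mem_singleton, List.mem_map] at hrow
    rcases hrow with ⟨i, hi, rfl⟩ | rfl
    · simp [PySem.List.length_pyRange_one]
      omega
    · rw [PySem.List.slice_from _ (by omega)]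
      simp
      omega

-- the two fuelled loops agree on invariant states
theorem pvLoop_eq (fuel : Nat) (h s t : Int) (fb : List (List Int))
    (hinv : pvInv h s t fb) :
    pvLoopA fuel h s t fb = pvLoopB fuel h s t fb := by
  induction fuel generalizing h s t fb with
  | zero => rfl
  | succ fuel ih =>
    simp only [pvLoopA, pvLoopB]
    by_cases hg : h ≤ t - s
    · rw [if_neg (by omega), if_pos hg, pvStep_eq h s t fb hinv hg]
      exact ih _ _ _ _ (pvStep_inv h s t fb hinv hg)
    · rw [if_pos (by omega), if_neg hg]

-- ===== VERDICT (by name: the statement is the Claim_ definition above) =====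
theorem stack_fishbowls_spec : Claim_equal_stack_fishbowls := by
  intro h s t fb _ hpre
  show stack_fishbowls h s t fb = stack_fishbowls_alt h s t fb
  rcases hpre with hg | hinv
  · show pvLoopA ((h.natAbs + s.natAbs + t.natAbs) * 2 + 4) h s t fb
        = pvLoopB ((h.natAbs + s.natAbs + t.natAbs) * 2 + 4) h s t fb
    have hf : (h.natAbs + s.natAbs + t.natAbs) * 2 + 4
        = ((h.natAbs + s.natAbs + t.natAbs) * 2 + 3) + 1 := rfl
    rw [hf]
    simp only [pvLoopA, pvLoopB]
    rw [if_pos (by omega), if_neg (by omega)]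
  · exact pvLoop_eq _ h s t fb hinv
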